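-- pv_equiv track=rewrite | github.com/alex-baiet/OsuTransfert | OsuTransfert.py | prepareMusicName
-- ===== SOURCE A (Python) =====
-- def prepareMusicName(currentName) :
--     n = False
--     result = ""
--     for l in range (0,len(currentName)) :
--         # On rajoute toutes les caracteres à partir du 1er caractere non numerique.
--         if n or currentName[l] not in ["0","1","2","3","4","5","6","7","8","9"," "]:
--             n = True
--             result = result + currentName[l]
--
--     return result
-- ===== SOURCE B (Python) =====
-- def prepareMusicName(currentName):
--     skip = {"0", "1", "2", "3", "4", "5", "6", "7", "8", "9", " "}
--     i = 0
--     while i < len(currentName) and currentName[i] in skip: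
--         i += 1
--     return currentName[i:]
-- ===== Notes on version B (the rewrite author's own statement) =====
-- stated objective: simpler
-- what changed: B finds the first non-digit/space index with a while loop and returns a single slice, instead of A's boolean latch with char-by-char string accumulation.
import Mathlib
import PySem

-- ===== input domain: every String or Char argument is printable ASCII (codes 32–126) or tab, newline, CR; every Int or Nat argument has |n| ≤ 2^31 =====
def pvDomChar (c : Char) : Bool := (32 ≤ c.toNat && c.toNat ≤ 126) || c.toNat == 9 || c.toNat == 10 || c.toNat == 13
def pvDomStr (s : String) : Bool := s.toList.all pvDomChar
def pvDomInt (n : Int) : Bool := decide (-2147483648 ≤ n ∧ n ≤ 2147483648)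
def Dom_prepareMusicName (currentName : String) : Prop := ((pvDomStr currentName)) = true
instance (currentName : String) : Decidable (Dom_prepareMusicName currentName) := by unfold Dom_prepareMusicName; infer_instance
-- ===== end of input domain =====

-- B replaces A's boolean latch + char-by-char accumulation with a skip-the-prefix scan
-- returning one slice (objective: simpler).

-- ===== PORT A =====
-- the digit/space membership list A tests against (as single chars)
def pvSkipA (c : Char) : Bool :=
  c ∈ ['0','1','2','3','4','5','6','7','8','9',' ']

-- A: fold over the characters with state (n, result); result accumulated char by char.
def prepareMusicName (currentName : String) : String :=
  let st := currentName.toList.foldl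
    (fun (st : Bool × List Char) c =>
      if st.1 || !(pvSkipA c) then (true, st.2 ++ [c]) else st)
    (false, [])
  String.ofList st.2

-- ===== PORT B =====
-- B: advance past the leading digit/space prefix, return the rest in one piece.
def pvSkipGo (l : List Char) : List Char :=
  match l with
  | [] => []
  | c :: rest => if pvSkipA c then pvSkipGo rest else c :: rest

def prepareMusicName_alt (currentName : String) : String :=
  String.ofList (pvSkipGo currentName.toList)

-- ===== PRECONDITION & SPEC =====
def Spec_prepareMusicName (currentName : String) (out : String) : Prop := out = prepareMusicName_alt currentName
instance (currentName : String) (out : String) : Decidable (Spec_prepareMusicName currentName out) := by unfold Spec_prepareMusicName; infer_instance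

-- ===== CLAIM (what is proved, stated in full; the proofs are below) =====
def Claim_equal_prepareMusicName : Prop := ∀ (currentName : String), Dom_prepareMusicName currentName → Spec_prepareMusicName currentName (prepareMusicName currentName)

-- ===== LEMMAS AND PROOFS =====

-- once the latch is set, A appends everything remaining
theorem pvFoldTrue (l : List Char) (acc : List Char) :
    (l.foldl (fun (st : Bool × List Char) c =>
      if st.1 || !(pvSkipA c) then (true, st.2 ++ [c]) else st) (true, acc)) = (true, acc ++ l) := by
  induction l generalizing acc with
  | nil => simp
  | cons c rest ih =>
    rw [List.foldl_cons, if_pos (by simp), ih]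
    simp

-- before the latch is set, A's result is the accumulator plus the de-prefixed rest
theorem pvFoldFalse (l : List Char) (acc : List Char) :
    (l.foldl (fun (st : Bool × List Char) c =>
      if st.1 || !(pvSkipA c) then (true, st.2 ++ [c]) else st) (false, acc)).2 = acc ++ pvSkipGo l := by
  induction l generalizing acc with
  | nil => simp [pvSkipGo]
  | cons c rest ih =>
    rw [List.foldl_cons]
    by_cases h : pvSkipA c
    · rw [if_neg (by simp [h]), ih, pvSkipGo, if_pos h]
    · rw [if_pos (by simp [h]), pvFoldTrue, pvSkipGo, if_neg h]
      simp

-- ===== VERDICT (by name: the statement is the Claim_ definition above) =====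
theorem prepareMusicName_spec : Claim_equal_prepareMusicName := by
  intro s _
  show _ = _
  unfold prepareMusicName prepareMusicName_alt
  simp only []
  rw [pvFoldFalse, List.nil_append]
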